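-- pv_equiv track=rewrite | github.com/mwiens91/practice-problems | leetcode/3852.smallest-pair-with-different-frequencies.python2.py | minDistinctFreqPair
-- ===== SOURCE A (Python) =====
-- def minDistinctFreqPair(nums):
--     """
--     :type nums: List[int]
--     :rtype: List[int]
--     """
--     freqs = [0] * 101
--
--     for num in nums:
--         freqs[num] += 1
--
--     uniq_ordered_nums = sorted(set(nums))
--
--     for i, x in enumerate(uniq_ordered_nums):
--         for j in range(i + 1, len(uniq_ordered_nums)):
--             y = uniq_ordered_nums[j]
--
--             if freqs[x] != freqs[y]:
--                 return [x, y]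
--
--     return [-1, -1]
-- ===== SOURCE B (Python) =====
-- def minDistinctFreqPair(nums):
--     """
--     :type nums: List[int]
--     :rtype: List[int]
--     """
--     freqs = {}
--     for num in nums:
--         freqs[num] = freqs.get(num, 0) + 1
--
--     uniq = sorted(freqs)
--
--     if len(uniq) < 2:
--         return [-1, -1]
--
--     x = uniq[0]
--     fx = freqs[x]
--
--     for y in uniq[1:]:
--         if freqs[y] != fx:
--             return [x, y]
--
--     return [-1, -1]
-- ===== Notes on version B (the rewrite author's own statement) =====
-- stated objective: simpler
-- what changed: Replaces the fixed 101-slot table and the nested pair scan with a dict counter and a single pass comparing every other unique value's frequency against that of the smallest unique value (any differing pair must involve the minimum).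
-- outside the precondition, e.g. on minDistinctFreqPair([101]): A raises IndexError, B returns [-1, -1]; on minDistinctFreqPair([-1, 100, 0]): A returns [-1, 0], B returns [-1, -1]
import Mathlib
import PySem

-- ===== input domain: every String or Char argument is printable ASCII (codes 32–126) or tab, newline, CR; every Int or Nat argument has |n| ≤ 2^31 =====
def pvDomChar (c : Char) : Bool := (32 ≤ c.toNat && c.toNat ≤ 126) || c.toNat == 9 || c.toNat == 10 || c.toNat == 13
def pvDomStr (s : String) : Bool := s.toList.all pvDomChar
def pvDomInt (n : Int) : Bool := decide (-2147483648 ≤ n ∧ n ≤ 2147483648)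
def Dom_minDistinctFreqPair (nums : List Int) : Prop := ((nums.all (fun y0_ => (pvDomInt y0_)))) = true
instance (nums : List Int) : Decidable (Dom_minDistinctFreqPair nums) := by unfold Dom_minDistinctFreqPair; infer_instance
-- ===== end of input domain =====

-- B replaces A's fixed 101-slot table and nested pair scan by a dict counter and a single
-- pass against the smallest unique value's frequency (objective: simpler).

-- ===== PORT A =====
-- inner loop: for j in range(i+1, len(uniq)): y = uniq[j]; if freqs[x] != freqs[y]: return [x, y]
def pvAInner (freqs uniq : List Int) (x : Int) : List Int → Option (List Int)
  | [] => none
  | j :: js =>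
      let y := PySem.List.pyGetD uniq j 0
      if PySem.List.pyGetD freqs x 0 ≠ PySem.List.pyGetD freqs y 0 then some [x, y]
      else pvAInner freqs uniq x js

-- outer loop: for i, x in enumerate(uniq): …
def pvAOuter (freqs uniq : List Int) : List (Int × Int) → Option (List Int)
  | [] => none
  | (i, x) :: ps =>
      match pvAInner freqs uniq x (PySem.List.pyRange (i + 1) (uniq.length) 1) with
      | some r => some r
      | none => pvAOuter freqs uniq ps

def minDistinctFreqPair (nums : List Int) : List Int :=
  let freqs := nums.foldl
    (fun f num => PySem.List.pySetD f num (PySem.List.pyGetD f num 0 + 1))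
    (List.replicate 101 (0 : Int))
  let uniq := PySem.List.sorted (PySem.Set.ofList nums) (fun x => x) false
  match pvAOuter freqs uniq (PySem.List.enumerate uniq 0) with
  | some r => r
  | none => [-1, -1]

-- ===== PORT B =====
-- for y in uniq[1:]: if freqs[y] != fx: return [x, y]
def pvBScan (freqs : PySem.Dict Int Int) (x fx : Int) : List Int → List Int
  | [] => [-1, -1]
  | y :: ys =>
      if PySem.Dict.getD freqs y 0 ≠ fx then [x, y]
      else pvBScan freqs x fx ys

def minDistinctFreqPair_alt (nums : List Int) : List Int :=
  let freqs := nums.foldl (fun d num => PySem.Dict.modify d num 0 (· + 1)) PySem.Dict.empty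
  let uniq := PySem.List.sorted (PySem.Dict.keys freqs) (fun x => x) false
  if uniq.length < 2 then [-1, -1]
  else
    match uniq with
    | x :: rest => pvBScan freqs x (PySem.Dict.getD freqs x 0) rest
    | [] => [-1, -1]

-- ===== PRECONDITION & SPEC =====
-- Pre_ keeps elements in -101..100 (outside that range A's 101-slot table raises IndexError) and
-- excludes lists containing both a negative value n and n+101, on which A's negative-index
-- wraparound silently merges the two counts, an artefact of the fixed-size table.
def Pre_minDistinctFreqPair (nums : List Int) : Prop :=
  (∀ n ∈ nums, -101 ≤ n ∧ n ≤ 100) ∧ (∀ n ∈ nums, n < 0 → (n + 101) ∉ nums)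
instance (nums : List Int) : Decidable (Pre_minDistinctFreqPair nums) := by
  unfold Pre_minDistinctFreqPair; infer_instance

def pvWitness_minDistinctFreqPair : List Int := [1, 1, 2]

def Spec_minDistinctFreqPair (nums : List Int) (out : List Int) : Prop := out = minDistinctFreqPair_alt nums
instance (nums : List Int) (out : List Int) : Decidable (Spec_minDistinctFreqPair nums out) := by unfold Spec_minDistinctFreqPair; infer_instance

-- ===== CLAIM (what is proved, stated in full; the proofs are below) =====
def Claim_equal_minDistinctFreqPair : Prop := ∀ (nums : List Int), Dom_minDistinctFreqPair nums → Pre_minDistinctFreqPair nums → Spec_minDistinctFreqPair nums (minDistinctFreqPair nums)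

-- ===== LEMMAS AND PROOFS =====

-- first y (in order) among ys whose table frequency differs from x's, packaged as A returns it
def pvFirstY (freqs : List Int) (x : Int) : List Int → Option (List Int)
  | [] => none
  | y :: ys =>
      if PySem.List.pyGetD freqs x 0 ≠ PySem.List.pyGetD freqs y 0 then some [x, y]
      else pvFirstY freqs x ys

-- A's inner index loop over range(a, len(uniq)) is pvFirstY over uniq.drop a
lemma pvAInner_range (freqs uniq : List Int) (x : Int) :
    ∀ (k : Nat) (a : Int), 0 ≤ a → uniq.length - a.toNat = k →
      pvAInner freqs uniq x (PySem.List.pyRange a (uniq.length) 1) =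
        pvFirstY freqs x (uniq.drop a.toNat) := by
  intro k
  induction k with
  | zero =>
      intro a ha hk
      have hlen : (uniq.length : Int) ≤ a := by omega
      rw [PySem.List.pyRange_one_eq_nil hlen, List.drop_eq_nil_of_le (by omega)]
      rfl
  | succ k ih =>
      intro a ha hk
      have hlt : a < (uniq.length : Int) := by omega
      have hltn : a.toNat < uniq.length := by omega
      rw [PySem.List.pyRange_one_cons hlt, List.drop_eq_getElem_cons hltn]
      show (if PySem.List.pyGetD freqs x 0 ≠ PySem.List.pyGetD freqs (PySem.List.pyGetD uniq a 0) 0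
            then some [x, PySem.List.pyGetD uniq a 0]
            else pvAInner freqs uniq x (PySem.List.pyRange (a + 1) (uniq.length) 1)) = _
      rw [PySem.List.pyGetD_eq_getElem uniq 0 ha hlt, ih (a + 1) (by omega) (by omega)]
      have h1 : (a + 1).toNat = a.toNat + 1 := by omega
      rw [h1]
      rfl

lemma pvFirstY_eq_none_iff (freqs : List Int) (x : Int) (ys : List Int) :
    pvFirstY freqs x ys = none ↔
      ∀ y ∈ ys, PySem.List.pyGetD freqs y 0 = PySem.List.pyGetD freqs x 0 := by
  induction ys with
  | nil => simp [pvFirstY]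
  | cons y t ih =>
      show (if PySem.List.pyGetD freqs x 0 ≠ PySem.List.pyGetD freqs y 0
            then some [x, y] else pvFirstY freqs x t) = none ↔ _
      by_cases h : PySem.List.pyGetD freqs x 0 = PySem.List.pyGetD freqs y 0
      · rw [if_neg (not_not_intro h), ih]
        constructor
        · intro hall z hz
          rcases List.mem_cons.1 hz with hz | hz
          · rw [hz]; exact h.symm
          · exact hall z hz
        · intro hall z hz
          exact hall z (List.mem_cons_of_mem y hz)
      · rw [if_pos h]
        constructor
        · intro hc; exact absurd hc (by simp)
        · intro hall; exact absurd (hall y (by simp)).symm h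

-- B's scan equals A's pvFirstY result (default [-1,-1]) when the two frequency tables agree
lemma pvBScan_eq (d : PySem.Dict Int Int) (freqs : List Int) (x fx : Int)
    (hfx : fx = PySem.List.pyGetD freqs x 0) :
    ∀ ys : List Int, (∀ y ∈ ys, PySem.Dict.getD d y 0 = PySem.List.pyGetD freqs y 0) →
      pvBScan d x fx ys = (pvFirstY freqs x ys).getD [-1, -1] := by
  intro ys
  induction ys with
  | nil => intro _; rfl
  | cons y t ih =>
      intro hall
      have hy : PySem.Dict.getD d y 0 = PySem.List.pyGetD freqs y 0 := hall y (by simp)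
      by_cases h : PySem.List.pyGetD freqs x 0 = PySem.List.pyGetD freqs y 0
      · show (if PySem.Dict.getD d y 0 ≠ fx then [x, y] else pvBScan d x fx t) = _
        rw [if_neg (by rw [hy, hfx]; omega)]
        show _ = ((if PySem.List.pyGetD freqs x 0 ≠ PySem.List.pyGetD freqs y 0
                   then some [x, y] else pvFirstY freqs x t).getD [-1, -1])
        rw [if_neg (by omega)]
        exact ih (fun z hz => hall z (by simp [hz]))
      · show (if PySem.Dict.getD d y 0 ≠ fx then [x, y] else pvBScan d x fx t) = _
        rw [if_pos (by rw [hy, hfx]; omega)]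
        show _ = ((if PySem.List.pyGetD freqs x 0 ≠ PySem.List.pyGetD freqs y 0
                   then some [x, y] else pvFirstY freqs x t).getD [-1, -1])
        rw [if_pos h]
        rfl

-- when all frequencies on uniq agree, every remaining outer iteration finds nothing
lemma pvAOuter_none (freqs uniq : List Int) (c : Int)
    (hc : ∀ y ∈ uniq, PySem.List.pyGetD freqs y 0 = c) :
    ∀ ps : List (Int × Int), (∀ p ∈ ps, 0 ≤ p.1 ∧ p.2 ∈ uniq) →
      pvAOuter freqs uniq ps = none := by
  intro ps
  induction ps with
  | nil => intro _; rfl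
  | cons p t ih =>
      intro hps
      obtain ⟨i, x⟩ := p
      have hx : x ∈ uniq := (hps (i, x) (by simp)).2
      have hi : (0 : Int) ≤ i := (hps (i, x) (by simp)).1
      have hinner : pvAInner freqs uniq x (PySem.List.pyRange (i + 1) (uniq.length) 1) = none := by
        rw [pvAInner_range freqs uniq x (uniq.length - (i + 1).toNat) (i + 1) (by omega) rfl]
        rw [pvFirstY_eq_none_iff]
        intro y hy
        rw [hc y (List.mem_of_mem_drop hy), hc x hx]
      show (match pvAInner freqs uniq x (PySem.List.pyRange (i + 1) (uniq.length) 1) with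
            | some r => some r
            | none => pvAOuter freqs uniq t) = none
      rw [hinner]
      exact ih (fun q hq => hps q (by simp [hq]))

-- Python's index into the 101-slot table: negative indices wrap by +101
def pvSlot (v : Int) : Nat := (if v < 0 then v + 101 else v).toNat

lemma pvSlot_lt (v : Int) (h0 : -101 ≤ v) (h1 : v ≤ 100) : pvSlot v < 101 := by
  unfold pvSlot; split <;> omega

-- pySetD at a negative in-range index wraps (no PySem lemma covers the set side; exact per pyIdx?)
lemma pvSetD_neg (xs : List Int) (k : Nat) (v : Int) (h0 : 0 < k) (h1 : k ≤ xs.length) :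
    PySem.List.pySetD xs (-(k : Int)) v = xs.set (xs.length - k) v := by
  have hk : ¬ ((0 : Int) ≤ -(k : Int)) := by omega
  have hk2 : -((xs.length : Int)) ≤ -(k : Int) := by omega
  simp only [PySem.List.pySetD, PySem.List.pySet?, PySem.List.pyIdx?, if_neg hk, if_pos hk2,
    Option.map_some, Option.getD_some]
  congr 1
  omega

lemma pvGetSlot (f : List Int) (hf : f.length = 101) (v : Int) (h0 : -101 ≤ v) (h1 : v ≤ 100) :
    PySem.List.pyGetD f v 0 = f.getD (pvSlot v) 0 := by
  by_cases hv : v < 0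
  · have hkv : v = -(((-v).toNat : Nat) : Int) := by omega
    rw [hkv, PySem.List.pyGetD_neg_natCast f (-v).toNat 0 (by omega) (by omega)]
    rw [List.getD_eq_getElem f 0 (by unfold pvSlot; omega)]
    congr 1
    unfold pvSlot
    split <;> omega
  · rw [PySem.List.pyGetD_eq_getElem f 0 (by omega) (by omega),
        List.getD_eq_getElem f 0 (by unfold pvSlot; omega)]
    congr 1
    unfold pvSlot
    split <;> omega

lemma pvSetSlot (f : List Int) (hf : f.length = 101) (v w : Int) (h0 : -101 ≤ v) (h1 : v ≤ 100) :
    PySem.List.pySetD f v w = f.set (pvSlot v) w := by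
  by_cases hv : v < 0
  · have hkv : v = -(((-v).toNat : Nat) : Int) := by omega
    rw [hkv, pvSetD_neg f (-v).toNat w (by omega) (by omega)]
    congr 1
    unfold pvSlot
    split <;> omega
  · rw [PySem.List.pySetD_of_nonneg f w (by omega)]
    congr 1
    unfold pvSlot
    split <;> omega

-- A's fixed 101-slot table: slot s accumulates the elements whose wrapped index is s
lemma pvFoldA_spec (nums : List Int) (hpre : ∀ n ∈ nums, -101 ≤ n ∧ n ≤ 100) :
    ∀ f : List Int, f.length = 101 →
      (nums.foldl (fun f num => PySem.List.pySetD f num (PySem.List.pyGetD f num 0 + 1)) f).length = 101 ∧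
      ∀ s : Nat, s < 101 →
        (nums.foldl (fun f num => PySem.List.pySetD f num (PySem.List.pyGetD f num 0 + 1)) f).getD s 0 =
          f.getD s 0 + (nums.countP (fun n => pvSlot n == s) : Int) := by
  induction nums with
  | nil => intro f hf; exact ⟨hf, fun s _ => by simp⟩
  | cons num t ih =>
      intro f hf
      have hnum := hpre num (by simp)
      have hpre' : ∀ n ∈ t, -101 ≤ n ∧ n ≤ 100 := fun n hn => hpre n (by simp [hn])
      have hset : PySem.List.pySetD f num (PySem.List.pyGetD f num 0 + 1) =
          f.set (pvSlot num) (f.getD (pvSlot num) 0 + 1) := by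
        rw [pvSetSlot f hf num _ hnum.1 hnum.2, pvGetSlot f hf num hnum.1 hnum.2]
      have hflen : (f.set (pvSlot num) (f.getD (pvSlot num) 0 + 1)).length = 101 := by
        simp [hf]
      obtain ⟨hlen, hval⟩ := (ih hpre') _ hflen
      rw [List.foldl_cons, hset]
      refine ⟨hlen, fun s hs => ?_⟩
      rw [hval s hs, List.countP_cons]
      rw [List.getD_eq_getElem _ 0 (by rw [hflen]; omega), List.getElem_set]
      by_cases hsn : pvSlot num = s
      · have hp : (pvSlot num == s) = true := by simp [hsn]
        rw [if_pos hsn]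
        simp [hsn]
        omega
      · have hp : (pvSlot num == s) = false := by simp [hsn]
        rw [if_neg hsn]
        simp only [hp, Bool.false_eq_true, if_false,
          List.getD_eq_getElem f 0 (by omega : s < f.length)]
        push_cast
        omega

-- ===== VERDICT (by name: the statement is the Claim_ definition above) =====
theorem minDistinctFreqPair_spec : Claim_equal_minDistinctFreqPair := by
  intro nums _ hpre
  unfold Spec_minDistinctFreqPair
  show minDistinctFreqPair nums = minDistinctFreqPair_alt nums
  rw [minDistinctFreqPair, minDistinctFreqPair_alt]
  rw [show (nums.foldl (fun d num => PySem.Dict.modify d num 0 (· + 1)) PySem.Dict.empty)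
        = PySem.Dict.counter nums from (PySem.Dict.counter_eq_foldl nums).symm,
      PySem.Dict.keys_counter]
  set F := nums.foldl (fun f num => PySem.List.pySetD f num (PySem.List.pyGetD f num 0 + 1))
      (List.replicate 101 (0 : Int)) with hF
  set u := PySem.List.sorted (PySem.Set.ofList nums) (fun x => x) false with hu
  have hFinit : (List.replicate 101 (0 : Int)).length = 101 := by simp
  obtain ⟨hFlen, hFval⟩ := pvFoldA_spec nums hpre.1 _ hFinit
  have hFcount : ∀ v ∈ nums, PySem.List.pyGetD F v 0 = (nums.count v : Int) := by
    intro v hv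
    have hb := hpre.1 v hv
    rw [hF, pvGetSlot _ hFlen v hb.1 hb.2, hFval (pvSlot v) (pvSlot_lt v hb.1 hb.2)]
    have hcp : nums.countP (fun n => pvSlot n == pvSlot v) = nums.count v := by
      rw [List.count_eq_countP]
      apply List.countP_congr
      intro n hn
      have hbn := hpre.1 n hn
      simp only [beq_iff_eq]
      constructor
      · intro hslot
        by_cases hsn : n < 0 <;> by_cases hsv : v < 0
        · unfold pvSlot at hslot; rw [if_pos hsn, if_pos hsv] at hslot; omega
        · -- n < 0 ≤ v and slots equal ⇒ v = n + 101, a merged pair excluded by Pre_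
          exfalso
          have : n + 101 = v := by
            unfold pvSlot at hslot; rw [if_pos hsn, if_neg hsv] at hslot; omega
          exact hpre.2 n hn hsn (this ▸ hv)
        · exfalso
          have : v + 101 = n := by
            unfold pvSlot at hslot; rw [if_neg hsn, if_pos hsv] at hslot; omega
          exact hpre.2 v hv hsv (this ▸ hn)
        · unfold pvSlot at hslot; rw [if_neg hsn, if_neg hsv] at hslot; omega
      · intro h; rw [h]
    rw [hcp, List.getD_eq_getElem _ 0
          (by simp only [List.length_replicate]; exact pvSlot_lt v hb.1 hb.2),
        List.getElem_replicate]
    omega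
  have hmemu : ∀ y ∈ u, y ∈ nums := by
    intro y hy
    rw [hu, PySem.List.mem_sorted] at hy
    exact (PySem.Set.mem_ofList _ _).1 hy
  have hagree : ∀ y ∈ u, PySem.Dict.getD (PySem.Dict.counter nums) y 0 = PySem.List.pyGetD F y 0 := by
    intro y hy
    rw [PySem.Dict.getD_counter, hFcount y (hmemu y hy)]
  match hcase : u with
  | [] => rfl
  | [x] => rfl
  | x :: y :: t =>
      have hfx : PySem.Dict.getD (PySem.Dict.counter nums) x 0 = PySem.List.pyGetD F x 0 :=
        hagree x (by simp)
      have htail : ∀ z ∈ y :: t, PySem.Dict.getD (PySem.Dict.counter nums) z 0 =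
          PySem.List.pyGetD F z 0 := by
        intro z hz
        exact hagree z (by simp at hz ⊢; tauto)
      rw [if_neg (by simp)]
      rw [PySem.List.enumerate_cons]
      have hinner : pvAInner F (x :: y :: t) x
          (PySem.List.pyRange ((0 : Int) + 1) ((x :: y :: t).length) 1) = pvFirstY F x (y :: t) := by
        rw [pvAInner_range F (x :: y :: t) x ((x :: y :: t).length - ((0 : Int) + 1).toNat)
            ((0 : Int) + 1) (by omega) rfl]
        norm_num
      show (match (match pvAInner F (x :: y :: t) x
              (PySem.List.pyRange ((0 : Int) + 1) ((x :: y :: t).length) 1) with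
            | some r => some r
            | none => pvAOuter F (x :: y :: t) (PySem.List.enumerate (y :: t) ((0 : Int) + 1))) with
          | some r => r
          | none => [-1, -1]) =
        pvBScan (PySem.Dict.counter nums) x (PySem.Dict.getD (PySem.Dict.counter nums) x 0) (y :: t)
      rw [hinner, pvBScan_eq (PySem.Dict.counter nums) F x _ hfx (y :: t) htail]
      cases hfy : pvFirstY F x (y :: t) with
      | some r => rfl
      | none =>
          have hall : ∀ z ∈ y :: t, PySem.List.pyGetD F z 0 = PySem.List.pyGetD F x 0 :=
            (pvFirstY_eq_none_iff F x (y :: t)).1 hfy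
          have hc : ∀ z ∈ x :: y :: t, PySem.List.pyGetD F z 0 = PySem.List.pyGetD F x 0 := by
            intro z hz
            rcases List.mem_cons.1 hz with hz | hz
            · rw [hz]
            · exact hall z hz
          have houter : pvAOuter F (x :: y :: t) (PySem.List.enumerate (y :: t) ((0 : Int) + 1)) = none := by
            apply pvAOuter_none F (x :: y :: t) (PySem.List.pyGetD F x 0) hc
            intro p hp
            rcases (PySem.List.mem_enumerate_iff _ _ _).1 hp with ⟨k, hk, hpk⟩
            subst hpk
            constructor
            · simp; omega
            · exact List.mem_cons_of_mem x (List.getElem_mem hk)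
          rw [houter]
          rfl
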